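-- pv_equiv track=rewrite | github.com/josephsenior/Grinta-Agent | forge/metasop/patch_scoring.py | _count_dmp_hunks
-- ===== SOURCE A (Python) =====
-- def _count_dmp_hunks(diffs: list[tuple[int, str]]) -> tuple[int, int]:
--     """Count hunks and max hunk size from diffs.
--
--     Args:
--         diffs: List of diff operations
--
--     Returns:
--         Tuple of (hunk_count, max_hunk_chars)
--
--     """
--     hunks = 0
--     max_hunk_chars = 0
--     cur_hunk_chars = 0
--
--     for op, txt in diffs:
--         if op == 0:  # Equal operation
--             if cur_hunk_chars > 0:
--                 hunks += 1
--                 max_hunk_chars = max(max_hunk_chars, cur_hunk_chars)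
--                 cur_hunk_chars = 0
--         else:
--             cur_hunk_chars += len(txt)
--
--     if cur_hunk_chars > 0:
--         hunks += 1
--         max_hunk_chars = max(max_hunk_chars, cur_hunk_chars)
--
--     return hunks, max_hunk_chars
-- ===== SOURCE B (Python) =====
-- def _count_dmp_hunks(diffs: list[tuple[int, str]]) -> tuple[int, int]:
--     """Count hunks and max hunk size from diffs.
--
--     Splits the diff list into maximal runs of non-equal ops, collects the
--     positive run sizes into a list, then aggregates (count, max).
--     """
--     sizes = []
--     i = 0
--     n = len(diffs)
--     while i < n:
--         if diffs[i][0] == 0: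
--             i += 1
--         else:
--             total = 0
--             while i < n and diffs[i][0] != 0:
--                 total += len(diffs[i][1])
--                 i += 1
--             if total > 0:
--                 sizes.append(total)
--     return (len(sizes), max(sizes) if sizes else 0)
-- ===== Notes on version B (the rewrite author's own statement) =====
-- stated objective: alternative
-- what changed: B splits the diff list into maximal runs of non-equal ops and materialises the list of positive run sizes, then aggregates (count, max) over that list, instead of A's single scan threading (hunks, max, cur) running state.
import Mathlib
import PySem

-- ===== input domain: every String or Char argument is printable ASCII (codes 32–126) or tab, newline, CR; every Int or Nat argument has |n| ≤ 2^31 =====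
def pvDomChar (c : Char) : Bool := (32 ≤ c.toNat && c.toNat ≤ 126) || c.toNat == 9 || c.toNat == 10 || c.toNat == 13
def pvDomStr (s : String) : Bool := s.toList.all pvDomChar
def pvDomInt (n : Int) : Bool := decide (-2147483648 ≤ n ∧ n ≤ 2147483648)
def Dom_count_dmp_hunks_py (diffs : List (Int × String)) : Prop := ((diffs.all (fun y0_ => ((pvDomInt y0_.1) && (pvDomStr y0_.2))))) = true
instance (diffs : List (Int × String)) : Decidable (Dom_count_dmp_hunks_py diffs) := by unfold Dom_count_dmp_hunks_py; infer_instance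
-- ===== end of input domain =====

-- B replaces A's single scan with running (hunks, max, cur) state by an explicit
-- split into maximal non-equal runs, a materialised list of positive run sizes,
-- and a final (count, max) aggregation over that list.  Same return value.

-- ===== PORT A =====
-- loop body of A's for-loop over (op, txt), state = (hunks, max_hunk_chars, cur_hunk_chars)
def pvStepA (st : Int × Int × Int) (d : Int × String) : Int × Int × Int :=
  if d.1 = 0 then
    if st.2.2 > 0 then (st.1 + 1, max st.2.1 st.2.2, 0) else st
  else (st.1, st.2.1, st.2.2 + PySem.Str.len d.2)

def count_dmp_hunks_py (diffs : List (Int × String)) : Int × Int :=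
  let st := diffs.foldl pvStepA (0, 0, 0)
  if st.2.2 > 0 then (st.1 + 1, max st.2.1 st.2.2) else (st.1, st.2.1)

-- ===== PORT B =====
-- inner while-loop of B: consume the leading run of non-equal ops, return (sum of len(txt), remainder)
def pvSpanRun : List (Int × String) → Int × List (Int × String)
  | [] => (0, [])
  | (op, txt) :: rest =>
    if op = 0 then (0, (op, txt) :: rest)
    else
      let p := pvSpanRun rest
      (PySem.Str.len txt + p.1, p.2)

theorem pvSpanRun_len_le : ∀ l : List (Int × String), (pvSpanRun l).2.length ≤ l.length := by
  intro l
  induction l with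
  | nil => simp [pvSpanRun]
  | cons d rest ih =>
    obtain ⟨op, txt⟩ := d
    by_cases h : op = 0 <;> simp [pvSpanRun, h]
    omega

-- outer while-loop of B: the list `sizes` of positive run totals
def pvSizes : List (Int × String) → List Int
  | [] => []
  | (op, txt) :: rest =>
    if op = 0 then pvSizes rest
    else
      let p := pvSpanRun rest
      let total := PySem.Str.len txt + p.1
      if total > 0 then total :: pvSizes p.2 else pvSizes p.2
termination_by l => l.length
decreasing_by
  all_goals simp
  all_goals exact pvSpanRun_len_le rest

def count_dmp_hunks_py_alt (diffs : List (Int × String)) : Int × Int :=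
  let sizes := pvSizes diffs
  (PySem.List.len sizes, (PySem.List.max? sizes (fun y => y)).getD 0)

-- ===== PRECONDITION & SPEC =====
def Spec_count_dmp_hunks_py (diffs : List (Int × String)) (out : Int × Int) : Prop := out = count_dmp_hunks_py_alt diffs
instance (diffs : List (Int × String)) (out : Int × Int) : Decidable (Spec_count_dmp_hunks_py diffs out) := by unfold Spec_count_dmp_hunks_py; infer_instance

-- ===== CLAIM (what is proved, stated in full; the proofs are below) =====
def Claim_equal_count_dmp_hunks_py : Prop := ∀ (diffs : List (Int × String)), Dom_count_dmp_hunks_py diffs → Spec_count_dmp_hunks_py diffs (count_dmp_hunks_py diffs)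

-- ===== LEMMAS AND PROOFS =====

-- the list of positive run totals, computed A's way: carry `c` chars into the scan
def pvG (c : Int) : List (Int × String) → List Int
  | [] => if c > 0 then [c] else []
  | (op, t) :: r =>
    if op = 0 then (if c > 0 then c :: pvG 0 r else pvG 0 r)
    else pvG (c + PySem.Str.len t) r

theorem pvStrLen_nonneg (s : String) : 0 ≤ PySem.Str.len s := by
  simp [PySem.Str.len_eq]

-- the post-loop finalisation step of A
def pvFinish (st : Int × Int × Int) : Int × Int :=
  if st.2.2 > 0 then (st.1 + 1, max st.2.1 st.2.2) else (st.1, st.2.1)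

-- A's scan computes (h + #runs, running max over the run totals)
theorem pvA_loop (l : List (Int × String)) : ∀ h m c : Int, 0 ≤ c →
    pvFinish (l.foldl pvStepA (h, m, c))
    = (h + ((pvG c l).length : Int), (pvG c l).foldl max m) := by
  induction l with
  | nil =>
    intro h m c _
    simp only [List.foldl_nil, pvG, pvFinish]
    by_cases hc : c > 0 <;> simp [hc]
  | cons d r ih =>
    intro h m c hc
    obtain ⟨op, t⟩ := d
    simp only [List.foldl_cons]
    by_cases hop : op = 0
    · by_cases hpos : c > 0
      · rw [show pvStepA (h, m, c) (op, t) = (h + 1, max m c, 0) by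
          simp [pvStepA, hop, hpos]]
        rw [ih (h + 1) (max m c) 0 le_rfl]
        simp only [pvG, hop, hpos, if_pos]
        simp only [List.length_cons, List.foldl_cons, Prod.mk.injEq]
        exact ⟨by push_cast; ring, trivial⟩
      · have hc0 : c = 0 := by omega
        subst hc0
        rw [show pvStepA (h, m, 0) (op, t) = (h, m, 0) by simp [pvStepA, hop]]
        rw [ih h m 0 le_rfl]
        simp [pvG, hop]
    · have hlen := pvStrLen_nonneg t
      rw [show pvStepA (h, m, c) (op, t) = (h, m, c + PySem.Str.len t) by
        simp [pvStepA, hop]]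
      rw [ih h m (c + PySem.Str.len t) (by omega)]
      simp [pvG, hop]

-- relating pvG's carry to B's run splitter
theorem pvG_span (l : List (Int × String)) : ∀ c : Int,
    pvG c l = (if c + (pvSpanRun l).1 > 0 then [c + (pvSpanRun l).1] else []) ++ pvSizes (pvSpanRun l).2 := by
  induction l with
  | nil => intro c; simp [pvG, pvSpanRun, pvSizes]
  | cons d r ih =>
    intro c
    obtain ⟨op, t⟩ := d
    by_cases hop : op = 0
    · -- span stops here; pvSizes of the whole list = pvSizes r, and pvG 0 r = pvSizes r from ih
      have hr : pvSizes r = pvG 0 r := by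
        match r with
        | [] => simp [pvSizes, pvG]
        | (op', t') :: r' =>
          rw [ih 0]
          by_cases h2 : op' = 0
          · simp [pvSizes, pvSpanRun, h2]
          · simp only [pvSizes, pvSpanRun, h2, if_false, zero_add]
            split <;> simp_all
      simp only [pvG, pvSpanRun, hop, if_pos]
      simp only [pvSizes, if_pos]
      by_cases hpos : c > 0 <;> simp [hpos, hr]
    · simp only [pvG, pvSpanRun, hop, if_false]
      rw [ih (c + PySem.Str.len t)]
      have : c + (PySem.Str.len t + (pvSpanRun r).1) = c + PySem.Str.len t + (pvSpanRun r).1 := by ring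
      rw [this]

theorem pvSizes_eq_pvG (l : List (Int × String)) : pvSizes l = pvG 0 l := by
  match l with
  | [] => simp [pvSizes, pvG]
  | (op, t) :: r =>
    rw [pvG_span]
    by_cases hop : op = 0
    · simp [pvSizes, pvSpanRun, hop]
    · simp only [pvSizes, pvSpanRun, hop, if_false, zero_add]
      split <;> simp_all

theorem pvG_pos (l : List (Int × String)) : ∀ c x, x ∈ pvG c l → 0 < x := by
  induction l with
  | nil =>
    intro c x hx
    simp only [pvG] at hx
    split at hx <;> simp_all
  | cons d r ih =>
    intro c x hx
    obtain ⟨op, t⟩ := d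
    simp only [pvG] at hx
    split at hx
    · split at hx
      · rcases List.mem_cons.mp hx with h | h
        · omega
        · exact ih 0 x h
      · exact ih 0 x hx
    · exact ih _ x hx

-- ===== VERDICT (by name: the statement is the Claim_ definition above) =====
theorem count_dmp_hunks_py_spec : Claim_equal_count_dmp_hunks_py := by
  intro diffs _
  unfold Spec_count_dmp_hunks_py
  have halt : count_dmp_hunks_py_alt diffs
      = (((pvG 0 diffs).length : Int), (PySem.List.max? (pvG 0 diffs) (fun y => y)).getD 0) := by
    simp [count_dmp_hunks_py_alt, pvSizes_eq_pvG]
  have hcount : count_dmp_hunks_py diffs = pvFinish (diffs.foldl pvStepA (0, 0, 0)) := rfl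
  rw [hcount, pvA_loop diffs 0 0 0 le_rfl, halt]
  cases hG : pvG 0 diffs with
  | nil => simp [PySem.List.max?]
  | cons x t =>
    have hx : 0 < x := pvG_pos diffs 0 x (by rw [hG]; exact List.mem_cons_self ..)
    rw [PySem.List.max?_id_cons]
    simp only [Option.getD_some, List.foldl_cons]
    rw [show max (0 : Int) x = x from max_eq_right hx.le]
    simp
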